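-- pv_equiv track=rewrite | github.com/ahmedmahmoud-10/LCCN-Harvester-Client | src/utils/lccn_validator.py | _is_valid_lccn_remainder
-- ===== SOURCE A (Python) =====
-- def _is_valid_lccn_remainder(remainder: str) -> bool:
--     """
--     Validate the remainder after the initial class letters and digits.
--
--     This includes patterns like: .73.P38, .A1, etc.
--     """
--     if not remainder:
--         return True
--
--     # Must start with a period
--     if not remainder.startswith("."):
--         return False
--
--     # Split by periods to validate each segment
--     segments = remainder.split(".")
--
--     # First segment is empty (from leading period)
--     for i, segment in enumerate(segments[1:], 1):
--         if not segment:
--             # Double period or trailing period - could be valid in some cases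
--             continue
--
--         # Each segment should be alphanumeric
--         for ch in segment:
--             if not ch.isalnum():
--                 return False
--
--     return True
-- ===== SOURCE B (Python) =====
-- def _is_valid_lccn_remainder(remainder: str) -> bool:
--     """Staged library passes, no explicit loop: empty is valid; else the string
--     must start with '.' and, once all periods are deleted, what is left must be
--     empty or alphanumeric (str.isalnum judges the whole residue at once)."""
--     if not remainder:
--         return True
--     if not remainder.startswith("."):
--         return False
--     letters = remainder.replace(".", "")
--     return letters == "" or letters.isalnum()
-- ===== Notes on version B (the rewrite author's own statement) =====
-- stated objective: simpler
-- what changed: B has no character loop at all: instead of splitting into segments and scanning each character of each segment, it deletes every period with str.replace and judges the whole residue in one str.isalnum call (empty residue allowed).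
import Mathlib
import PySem

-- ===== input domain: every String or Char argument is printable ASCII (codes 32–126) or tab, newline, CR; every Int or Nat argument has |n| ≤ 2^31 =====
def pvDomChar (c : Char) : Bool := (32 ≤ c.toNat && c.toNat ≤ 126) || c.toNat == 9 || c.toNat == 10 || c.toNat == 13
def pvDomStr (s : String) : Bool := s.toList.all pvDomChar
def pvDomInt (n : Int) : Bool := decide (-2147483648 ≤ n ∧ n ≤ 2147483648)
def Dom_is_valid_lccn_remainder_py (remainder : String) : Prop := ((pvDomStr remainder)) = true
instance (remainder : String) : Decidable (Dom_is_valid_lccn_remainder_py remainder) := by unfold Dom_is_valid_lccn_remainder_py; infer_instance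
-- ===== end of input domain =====

-- B has no explicit character loop: instead of A's split-into-segments pass with
-- nested segment/char loops, B deletes the periods with str.replace and judges the
-- whole residue with one str.isalnum call (objective: simpler).


-- ===== PORT A =====
-- inner loop: `for ch in segment: if not ch.isalnum(): return False`
def pvSegOk : List Char → Bool
  | [] => true
  | ch :: rest => if !(PySem.Chars.isalnum ch) then false else pvSegOk rest

-- outer loop over segments[1:] (the enumerate index i is unused in A)
def pvSegLoop : List String → Bool
  | [] => true
  | seg :: rest =>
      if seg.toList = [] then pvSegLoop rest
      else if pvSegOk seg.toList then pvSegLoop rest else false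

def is_valid_lccn_remainder_py (remainder : String) : Bool :=
  if remainder.toList = [] then true
  else if !(PySem.Str.startswith remainder ".") then false
  else
    -- remainder.split("."): sep "." ≠ "" so split? is always `some`; getD [] is unreachable
    let segments := (PySem.Str.split? remainder ".").getD []
    pvSegLoop (segments.drop 1)

-- ===== PORT B =====
def is_valid_lccn_remainder_py_alt (remainder : String) : Bool :=
  if remainder.toList = [] then true
  else if !(PySem.Str.startswith remainder ".") then false
  else
    let letters := PySem.Str.replace remainder "." ""
    letters.toList = [] || PySem.Str.strIsalnum letters

-- ===== PRECONDITION & SPEC =====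
def Spec_is_valid_lccn_remainder_py (remainder : String) (out : Bool) : Prop := out = is_valid_lccn_remainder_py_alt remainder
instance (remainder : String) (out : Bool) : Decidable (Spec_is_valid_lccn_remainder_py remainder out) := by unfold Spec_is_valid_lccn_remainder_py; infer_instance

-- ===== CLAIM (what is proved, stated in full; the proofs are below) =====
def Claim_equal_is_valid_lccn_remainder_py : Prop := ∀ (remainder : String), Dom_is_valid_lccn_remainder_py remainder → Spec_is_valid_lccn_remainder_py remainder (is_valid_lccn_remainder_py remainder)

-- ===== LEMMAS AND PROOFS =====

theorem pvSegOk_eq (s : List Char) : pvSegOk s = s.all PySem.Chars.isalnum := by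
  induction s with
  | nil => rfl
  | cons c cs ih => by_cases h : PySem.Chars.isalnum c <;> simp [pvSegOk, h, ih]

theorem pvSegLoop_eq (segs : List String) :
    pvSegLoop segs = (segs.map String.toList).all (fun s => s.all PySem.Chars.isalnum) := by
  induction segs with
  | nil => rfl
  | cons s rest ih =>
      have h3 := pvSegOk_eq s.toList
      by_cases h : s.toList = []
      · simp [pvSegLoop, h, ih]
      · by_cases h2 : s.toList.all PySem.Chars.isalnum = true <;>
          simp [pvSegLoop, h, h3, h2, ih]

-- accumulator extraction for splitOn.go
theorem pv_go_acc (sep : List Char) (fuel : Nat) (l cur : List Char) (acc : List (List Char)) :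
    PySem.Chars.splitOn.go sep fuel l cur acc =
      acc.reverse ++ PySem.Chars.splitOn.go sep fuel l cur [] := by
  induction fuel generalizing l cur acc with
  | zero => simp [PySem.Chars.splitOn.go]
  | succ fuel ih =>
      cases l with
      | nil => simp [PySem.Chars.splitOn.go]
      | cons c rest =>
          simp only [PySem.Chars.splitOn.go]
          by_cases h : sep.isPrefixOf (c :: rest)
          · simp only [h, if_true]
            rw [ih _ _ (cur.reverse :: acc), ih _ _ [cur.reverse]]
            simp
          · simp only [h]
            exact ih _ _ _

-- flatten of the segments of a '.'-split is the input with the periods removed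
theorem pv_go_flatten (fuel : Nat) (l cur : List Char) (acc : List (List Char))
    (h : l.length < fuel) :
    (PySem.Chars.splitOn.go ['.'] fuel l cur acc).flatten =
      acc.reverse.flatten ++ cur.reverse ++ l.filter (fun c => !(c == '.')) := by
  induction fuel generalizing l cur acc with
  | zero => omega
  | succ fuel ih =>
      cases l with
      | nil => simp [PySem.Chars.splitOn.go]
      | cons c rest =>
          simp only [PySem.Chars.splitOn.go]
          by_cases hp : List.isPrefixOf ['.'] (c :: rest) = true
          · have hc : c = '.' := by
              have h2 := hp; simp [List.isPrefixOf] at h2; exact h2.symm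
            rw [if_pos hp, ih _ _ _ (by simp at h ⊢; omega)]
            simp [hc]
          · have hc : ¬ (c = '.') := by
              intro hcc; apply hp; simp [List.isPrefixOf, hcc]
            rw [if_neg hp, ih _ _ _ (by simp at h ⊢; omega)]
            simp [hc]

-- replace.go deleting "." is filtering the periods out
theorem pv_replace_go_filter (fuel : Nat) (l acc : List Char) (h : l.length ≤ fuel) :
    PySem.Chars.replace.go ['.'] [] fuel l acc =
      acc.reverse ++ l.filter (fun c => !(c == '.')) := by
  induction fuel generalizing l acc with
  | zero =>
      cases l with
      | nil => simp [PySem.Chars.replace.go]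
      | cons c rest => simp at h
  | succ fuel ih =>
      cases l with
      | nil => simp [PySem.Chars.replace.go]
      | cons c rest =>
          simp only [PySem.Chars.replace.go]
          by_cases hp : List.isPrefixOf ['.'] (c :: rest) = true
          · have hc : c = '.' := by
              have h2 := hp; simp [List.isPrefixOf] at h2; exact h2.symm
            rw [if_pos hp, ih _ _ (by simp at h ⊢; omega)]
            simp [hc]
          · have hc : ¬ (c = '.') := by
              intro hcc; apply hp; simp [List.isPrefixOf, hcc]
            rw [if_neg hp, ih _ _ (by simp at h ⊢; omega)]
            simp [hc]

theorem pv_replace_filter (s : List Char) :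
    PySem.Chars.replace s ['.'] [] = s.filter (fun c => !(c == '.')) := by
  unfold PySem.Chars.replace
  rw [if_neg (by simp)]
  simpa using pv_replace_go_filter s.length s [] le_rfl

-- one unfolding step of splitOn.go on a leading '.'
theorem pv_go_cons_dot (fuel : Nat) (rest cur : List Char) (acc : List (List Char)) :
    PySem.Chars.splitOn.go ['.'] (fuel + 1) ('.' :: rest) cur acc =
      PySem.Chars.splitOn.go ['.'] fuel rest [] (cur.reverse :: acc) := by
  simp only [PySem.Chars.splitOn.go]
  rw [if_pos (by simp [List.isPrefixOf])]
  simp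

-- ===== VERDICT (by name: the statement is the Claim_ definition above) =====
theorem is_valid_lccn_remainder_py_spec : Claim_equal_is_valid_lccn_remainder_py := by
  intro remainder _
  unfold Spec_is_valid_lccn_remainder_py
  unfold is_valid_lccn_remainder_py is_valid_lccn_remainder_py_alt
  by_cases hnil : remainder.toList = []
  · simp [hnil]
  · simp only [hnil]
    by_cases hsw : PySem.Str.startswith remainder "." = true
    · rw [hsw]
      simp only [Bool.not_true, Bool.false_eq_true, if_false]
      -- the string starts with '.', so toList = '.' :: rest
      have hpre : (".".toList) <+: remainder.toList := by
        rw [← PySem.Chars.startswith_iff]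
        simpa using hsw
      obtain ⟨rest, hrest⟩ := hpre
      have hlist : remainder.toList = '.' :: rest := by simpa using hrest.symm
      -- B's side: replace deletes the periods, strIsalnum checks the residue
      have hrep : (PySem.Str.replace remainder "." "").toList =
          remainder.toList.filter (fun c => !(c == '.')) := by
        rw [PySem.Str.toList_replace]
        simpa using pv_replace_filter remainder.toList
      -- identify the segments returned by split?
      have hsplit : Option.map (List.map String.toList) (PySem.Str.split? remainder ".") =
          PySem.Chars.split? remainder.toList ".".toList := PySem.Str.split?_map remainder "."
      cases hs : PySem.Str.split? remainder "." with
      | none =>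
          rw [hs] at hsplit
          simp [PySem.Chars.split?] at hsplit
      | some segs =>
          rw [hs] at hsplit
          simp only [Option.map_some, PySem.Chars.split?] at hsplit
          rw [if_neg (by simp)] at hsplit
          have hsegs : segs.map String.toList = PySem.Chars.splitOn remainder.toList ".".toList := by
            simpa using hsplit
          have hchars : (".".toList) = ['.'] := by decide
          rw [hchars] at hsegs
          have hstep : PySem.Chars.splitOn remainder.toList ['.'] =
              [] :: PySem.Chars.splitOn.go ['.'] (rest.length + 1) rest [] [] := by
            show PySem.Chars.splitOn.go ['.'] (remainder.toList.length + 1) remainder.toList [] [] = _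
            rw [hlist]
            have hlen : ('.' :: rest).length + 1 = (rest.length + 1) + 1 := by simp
            rw [hlen, pv_go_cons_dot, pv_go_acc]
            simp
          simp only [Option.getD_some]
          rw [pvSegLoop_eq, List.map_drop, hsegs, hstep]
          simp only [List.drop_succ_cons, List.drop_zero]
          rw [← List.all_flatten, pv_go_flatten _ _ _ _ (by omega)]
          simp only [List.reverse_nil, List.flatten_nil, List.nil_append]
          -- A's side is now: all isalnum of the filtered rest; B's is the same via hrep
          rw [PySem.Str.strIsalnum_eq, hrep, PySem.Chars.strIsalnum, hlist]
          have hfc : ('.' :: rest).filter (fun c => !(c == '.')) =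
              rest.filter (fun c => !(c == '.')) := by simp
          rw [hfc]
          cases hfe : rest.filter (fun c => !(c == '.')) with
          | nil => simp
          | cons x xs => simp
    · have hsw' : PySem.Str.startswith remainder "." = false := by
        cases hx : PySem.Str.startswith remainder "." with
        | false => rfl
        | true => exact absurd hx hsw
      rw [hsw']
      simp
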